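-- pv_equiv track=rewrite | github.com/Brymir7/AdventOfCode2023 | Day10_2.py | raytrace_polygon
-- ===== SOURCE A (Python) =====
-- def raytrace_polygon(curr_x, curr_y, matrix, pipe_positions):
--     number_of_intersections = 0
--
--     for x_pos in range(curr_x):
--         if (x_pos, curr_y) not in pipe_positions:
--             continue
--         if matrix[curr_y][x_pos] in ["J", "L", "|", 'S']:
--             number_of_intersections += 1
--
--     return number_of_intersections
-- ===== SOURCE B (Python) =====
-- def raytrace_polygon(curr_x, curr_y, matrix, pipe_positions):
--     return len({x for (x, y) in pipe_positions
--                 if y == curr_y and 0 <= x < curr_x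
--                 and matrix[y][x] in ("J", "L", "|", "S")})
-- ===== Notes on version B (the rewrite author's own statement) =====
-- stated objective: faster
-- what changed: B iterates once over pipe_positions and takes the size of the set of qualifying x coordinates, instead of scanning every index in range(curr_x) and membership-testing it against pipe_positions.
import Mathlib
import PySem

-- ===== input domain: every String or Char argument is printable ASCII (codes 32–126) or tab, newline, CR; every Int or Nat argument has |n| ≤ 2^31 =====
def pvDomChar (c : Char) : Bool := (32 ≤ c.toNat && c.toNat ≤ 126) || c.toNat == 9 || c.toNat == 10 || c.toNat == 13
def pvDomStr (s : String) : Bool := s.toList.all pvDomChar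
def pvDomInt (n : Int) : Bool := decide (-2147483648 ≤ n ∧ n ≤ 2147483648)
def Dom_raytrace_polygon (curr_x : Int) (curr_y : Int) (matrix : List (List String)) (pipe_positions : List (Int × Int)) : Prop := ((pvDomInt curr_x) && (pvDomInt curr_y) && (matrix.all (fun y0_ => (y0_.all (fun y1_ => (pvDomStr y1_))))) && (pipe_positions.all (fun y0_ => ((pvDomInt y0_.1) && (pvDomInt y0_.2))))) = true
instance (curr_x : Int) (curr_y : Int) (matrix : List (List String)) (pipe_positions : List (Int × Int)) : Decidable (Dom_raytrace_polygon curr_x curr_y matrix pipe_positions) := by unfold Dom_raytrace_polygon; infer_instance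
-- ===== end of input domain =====

-- B replaces A's scan over range(curr_x) with a single pass over pipe_positions, counting the set of qualifying x coordinates (asymptotically faster when curr_x is large).


-- matrix[y][x] (Python double indexing, negative wraparound included; none = IndexError)
def pvCell (matrix : List (List String)) (y x : Int) : Option String :=
  (PySem.List.pyGet? matrix y).bind (fun row => PySem.List.pyGet? row x)

-- ===== PORT A =====
def raytrace_polygon (curr_x : Int) (curr_y : Int) (matrix : List (List String)) (pipe_positions : List (Int × Int)) : Int :=
  (PySem.List.pyRange 0 curr_x 1).foldl (fun number_of_intersections x_pos =>
    if (x_pos, curr_y) ∉ pipe_positions then number_of_intersections   -- continue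
    else
      match pvCell matrix curr_y x_pos with
      | some s =>
          if s ∈ (["J", "L", "|", "S"] : List String) then number_of_intersections + 1
          else number_of_intersections
      | none => number_of_intersections)   -- Python raises IndexError here; excluded by Pre_
    0

-- ===== PORT B =====
def raytrace_polygon_alt (curr_x : Int) (curr_y : Int) (matrix : List (List String)) (pipe_positions : List (Int × Int)) : Int :=
  ((PySem.Set.ofList ((pipe_positions.filter (fun p =>
      p.2 == curr_y && decide ((0:Int) ≤ p.1) && decide (p.1 < curr_x) &&
      (match pvCell matrix p.2 p.1 with
       | some s => decide (s ∈ (["J", "L", "|", "S"] : List String))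
       | none => false))).map Prod.fst)).length : Int)

-- ===== PRECONDITION & SPEC =====
-- Pre_ excludes exactly the inputs on which Python A raises IndexError: a pipe position in
-- row curr_y with 0 ≤ x < curr_x whose matrix cell does not exist (B raises there as well).
def Pre_raytrace_polygon (curr_x : Int) (curr_y : Int) (matrix : List (List String)) (pipe_positions : List (Int × Int)) : Prop :=
  ∀ p ∈ pipe_positions, p.2 = curr_y → 0 ≤ p.1 → p.1 < curr_x → (pvCell matrix curr_y p.1).isSome
instance (curr_x : Int) (curr_y : Int) (matrix : List (List String)) (pipe_positions : List (Int × Int)) : Decidable (Pre_raytrace_polygon curr_x curr_y matrix pipe_positions) := by unfold Pre_raytrace_polygon; infer_instance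
def pvWitness_raytrace_polygon : Int × Int × List (List String) × (List (Int × Int)) :=
  (2, 0, [["|", "J"], [".", "-"]], [(0, 0), (1, 0), (1, 1)])

def Spec_raytrace_polygon (curr_x : Int) (curr_y : Int) (matrix : List (List String)) (pipe_positions : List (Int × Int)) (out : Int) : Prop := out = raytrace_polygon_alt curr_x curr_y matrix pipe_positions
instance (curr_x : Int) (curr_y : Int) (matrix : List (List String)) (pipe_positions : List (Int × Int)) (out : Int) : Decidable (Spec_raytrace_polygon curr_x curr_y matrix pipe_positions out) := by unfold Spec_raytrace_polygon; infer_instance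

-- ===== CLAIM (what is proved, stated in full; the proofs are below) =====
def Claim_equal_raytrace_polygon : Prop := ∀ (curr_x : Int) (curr_y : Int) (matrix : List (List String)) (pipe_positions : List (Int × Int)), Dom_raytrace_polygon curr_x curr_y matrix pipe_positions → Pre_raytrace_polygon curr_x curr_y matrix pipe_positions → Spec_raytrace_polygon curr_x curr_y matrix pipe_positions (raytrace_polygon curr_x curr_y matrix pipe_positions)

-- ===== LEMMAS AND PROOFS =====

-- the per-x test A effectively applies
def pvP (curr_y : Int) (matrix : List (List String)) (pipe_positions : List (Int × Int)) (x : Int) : Bool :=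
  decide ((x, curr_y) ∈ pipe_positions) &&
    (match pvCell matrix curr_y x with
     | some s => decide (s ∈ (["J", "L", "|", "S"] : List String))
     | none => false)

lemma foldl_count (p : Int → Bool) (l : List Int) : ∀ (n : Int),
    l.foldl (fun acc x => if p x then acc + 1 else acc) n = n + ((l.filter p).length : Int) := by
  induction l with
  | nil => intro n; simp
  | cons a t ih =>
      intro n
      by_cases h : p a = true <;> simp [List.foldl, h, ih] <;> push_cast <;> ring

lemma portA_eq_filter_length (curr_x curr_y : Int) (matrix : List (List String)) (pipe_positions : List (Int × Int)) :
    raytrace_polygon curr_x curr_y matrix pipe_positions =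
      (((PySem.List.pyRange 0 curr_x 1).filter (pvP curr_y matrix pipe_positions)).length : Int) := by
  unfold raytrace_polygon
  have hfun : (fun (number_of_intersections : Int) (x_pos : Int) =>
      if (x_pos, curr_y) ∉ pipe_positions then number_of_intersections
      else
        match pvCell matrix curr_y x_pos with
        | some s =>
            if s ∈ (["J", "L", "|", "S"] : List String) then number_of_intersections + 1
            else number_of_intersections
        | none => number_of_intersections)
      = (fun acc x => if pvP curr_y matrix pipe_positions x then acc + 1 else acc) := by
    funext acc x
    unfold pvP
    by_cases hm : (x, curr_y) ∈ pipe_positions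
    · cases hc : pvCell matrix curr_y x with
      | none => simp [hm, hc]
      | some s => by_cases hs : s ∈ (["J", "L", "|", "S"] : List String) <;> simp [hm, hc, hs]
    · simp [hm]
  rw [hfun, foldl_count]
  simp

lemma mem_filterA (curr_x curr_y : Int) (matrix : List (List String)) (pipe_positions : List (Int × Int)) (x : Int) :
    x ∈ (PySem.List.pyRange 0 curr_x 1).filter (pvP curr_y matrix pipe_positions) ↔
      (0 ≤ x ∧ x < curr_x) ∧ (x, curr_y) ∈ pipe_positions ∧
        (match pvCell matrix curr_y x with
         | some s => decide (s ∈ (["J", "L", "|", "S"] : List String))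
         | none => false) = true := by
  simp [List.mem_filter, PySem.List.mem_pyRange_one, pvP, and_assoc]

lemma mem_listB (curr_x curr_y : Int) (matrix : List (List String)) (pipe_positions : List (Int × Int)) (x : Int) :
    x ∈ PySem.Set.ofList ((pipe_positions.filter (fun p =>
        p.2 == curr_y && decide ((0:Int) ≤ p.1) && decide (p.1 < curr_x) &&
        (match pvCell matrix p.2 p.1 with
         | some s => decide (s ∈ (["J", "L", "|", "S"] : List String))
         | none => false))).map Prod.fst) ↔
      (0 ≤ x ∧ x < curr_x) ∧ (x, curr_y) ∈ pipe_positions ∧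
        (match pvCell matrix curr_y x with
         | some s => decide (s ∈ (["J", "L", "|", "S"] : List String))
         | none => false) = true := by
  rw [PySem.Set.mem_ofList]
  constructor
  · rintro h
    rcases List.mem_map.mp h with ⟨p, hp, rfl⟩
    rcases List.mem_filter.mp hp with ⟨hmem, hq⟩
    simp only [Bool.and_eq_true, beq_iff_eq, decide_eq_true_eq] at hq
    obtain ⟨⟨⟨hy, h0⟩, hlt⟩, hc⟩ := hq
    refine ⟨⟨h0, hlt⟩, ?_, ?_⟩
    · rcases p with ⟨px, py⟩; simp only at hy; subst hy; exact hmem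
    · rcases p with ⟨px, py⟩; simp only at hy ⊢; rw [← hy]; exact hc
  · rintro ⟨⟨h0, hlt⟩, hmem, hc⟩
    refine List.mem_map.mpr ⟨(x, curr_y), List.mem_filter.mpr ⟨hmem, ?_⟩, rfl⟩
    simp [h0, hlt]
    simpa using hc

-- ===== VERDICT (by name: the statement is the Claim_ definition above) =====
theorem raytrace_polygon_spec : Claim_equal_raytrace_polygon := by
  intro curr_x curr_y matrix pipe_positions _ _
  unfold Spec_raytrace_polygon
  rw [portA_eq_filter_length]
  unfold raytrace_polygon_alt
  congr 1
  apply List.Perm.length_eq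
  apply (List.perm_ext_iff_of_nodup ?_ ?_).mpr
  · intro a
    rw [mem_filterA, mem_listB]
  · exact (PySem.List.nodup_pyRange_one 0 curr_x).filter _
  · exact PySem.Set.nodup_ofList _
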